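-- pv_equiv track=rewrite | github.com/NicoHoed/Signaux-III | src/engine.py | score_layout
-- ===== SOURCE A (Python) =====
-- LAYOUT_RULES = {
--     "AZERTY": {
--         # Si je trouve ces lettres en HAUT, c'est +++ pour AZERTY
--         "TOP":  {'A', 'Z', 'E', 'R', 'T'},
--         # Si je trouve ces lettres au MILIEU, c'est +++ pour AZERTY
--         "MID":  {'Q', 'S', 'D', 'F', 'G', 'M'}, # M est au milieu en AZERTY (souvent)
--         # Si je trouve ces lettres en BAS, c'est +++ pour AZERTY
--         "BOT":  {'W', 'X', 'C', 'V'}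
--     },
--     "QWERTY": {
--         "TOP":  {'Q', 'W', 'E', 'R', 'T', 'Y'},
--         "MID":  {'A', 'S', 'D', 'F', 'G'},
--         "BOT":  {'Z', 'X', 'C', 'V'}
--     },
--     "QWERTZ": {
--         "TOP":  {'Q', 'W', 'E', 'R', 'T', 'Z'},
--         "MID":  {'A', 'S', 'D', 'F', 'G'},
--         "BOT":  {'Y', 'X', 'C', 'V'}
--     }
-- }
--
-- def score_layout(char_to_row_map):
--     """
--     Nouveau système de scoring pondéré.
--     """
--     scores = {k: 0 for k in LAYOUT_RULES.keys()}
--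
--     # On compte combien de lettres pertinentes on a trouvées au total
--     relevant_chars_found = 0
--
--     for char, detected_row in char_to_row_map.items():
--         # 0=TOP, 1=MID, 2=BOT
--
--         relevant_chars_found += 1
--
--         for layout_name, rules in LAYOUT_RULES.items():
--
--             # --- RÈGLES POSITIVES (Bonus) ---
--             if detected_row == 0 and char in rules["TOP"]:
--                 scores[layout_name] += 10 # Gros bonus si bonne lettre en haut
--                 # Bonus Spécial AZERTY/QWERTY
--                 if char in ['A', 'Q', 'Z', 'W']: scores[layout_name] += 15
--
--             elif detected_row == 1 and char in rules["MID"]: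
--                 scores[layout_name] += 10
--                 if char in ['A', 'Q', 'M']: scores[layout_name] += 15
--
--             elif detected_row == 2 and char in rules["BOT"]:
--                 scores[layout_name] += 10
--                 if char in ['W', 'Z', 'Y', 'M']: scores[layout_name] += 15
--
--             # --- RÈGLES NÉGATIVES (Malus / Contradiction) ---
--             # Si je vois un 'Q' en haut, ce N'EST PAS un AZERTY
--             if detected_row == 0 and char == 'Q':
--                 scores['AZERTY'] -= 50
--
--             # Si je vois un 'A' en haut, ce N'EST PAS un QWERTY/QWERTZ
--             if detected_row == 0 and char == 'A':
--                 scores['QWERTY'] -= 50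
--                 scores['QWERTZ'] -= 50
--
--             # Si je vois un 'Z' en haut, ce N'EST PAS un QWERTY (Z est en bas)
--             if detected_row == 0 and char == 'Z':
--                 scores['QWERTY'] -= 50
--                 # C'est soit AZERTY soit QWERTZ
--
--             # Si je vois un 'Y' en bas, c'est probablement QWERTZ
--             if detected_row == 2 and char == 'Y':
--                 scores['QWERTZ'] += 40
--                 scores['QWERTY'] -= 20 # Y est en haut en QWERTY
--
--     # Normalisation et décision
--     if relevant_chars_found == 0:
--         return "INCONNU", 0, scores
--
--     best_layout = max(scores, key=scores.get)
--     max_score = scores[best_layout]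
--
--     # Confiance relative (écart avec le deuxième meilleur)
--     sorted_scores = sorted(scores.values(), reverse=True)
--     if len(sorted_scores) > 1:
--         margin = sorted_scores[0] - sorted_scores[1]
--         # Si la marge est grande (>50 pts), confiance max
--         confidence = min(100, max(0, 50 + margin))
--     else:
--         confidence = 0
--
--     # Si le score est négatif ou très bas, on doute
--     if max_score <= 0:
--         return "INCERTAIN", 0, scores
--
--     return best_layout, confidence, scores
-- ===== SOURCE B (Python) =====
-- # Table-driven rewrite: every per-character rule of the original scorer is
-- # additive, so it folds into one static (row, char) -> per-layout delta table;
-- # scoring is then a single accumulation pass plus closed-form max/median logic.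
--
-- # _DELTA[row][char] = (delta_AZERTY, delta_QWERTY, delta_QWERTZ); the folded
-- # values include the tripled negative rules (the original applies them once
-- # per layout iteration) and the stacked special bonuses.
-- _DELTA = {
--     0: {'A': (25, -150, -150), 'E': (10, 10, 10), 'Q': (-150, 25, 25),
--         'R': (10, 10, 10), 'T': (10, 10, 10), 'W': (0, 25, 25),
--         'Y': (0, 10, 0), 'Z': (25, -150, 25)},
--     1: {'A': (0, 25, 25), 'D': (10, 10, 10), 'F': (10, 10, 10),
--         'G': (10, 10, 10), 'M': (25, 0, 0), 'Q': (25, 0, 0),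
--         'S': (10, 10, 10)},
--     2: {'C': (10, 10, 10), 'V': (10, 10, 10), 'W': (25, 0, 0),
--         'X': (10, 10, 10), 'Y': (0, -60, 145), 'Z': (0, 25, 0)},
-- }
--
--
-- def score_layout(char_to_row_map):
--     if not char_to_row_map:
--         return "INCONNU", 0, {"AZERTY": 0, "QWERTY": 0, "QWERTZ": 0}
--     az = qw = qz = 0
--     for ch, row in char_to_row_map.items():
--         e = _DELTA.get(row, {}).get(ch)
--         if e is not None:
--             az += e[0]
--             qw += e[1]
--             qz += e[2]
--     scores = {"AZERTY": az, "QWERTY": qw, "QWERTZ": qz}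
--     # first key with the maximal score (insertion order AZERTY, QWERTY, QWERTZ)
--     if az >= qw and az >= qz:
--         best, top = "AZERTY", az
--     elif qw >= qz:
--         best, top = "QWERTY", qw
--     else:
--         best, top = "QWERTZ", qz
--     if top <= 0:
--         return "INCERTAIN", 0, scores
--     # second-best of three values = median = largest pairwise minimum
--     second = max(min(az, qw), min(az, qz), min(qw, qz))
--     confidence = min(100, max(0, 50 + top - second))
--     return best, confidence, scores
-- ===== Notes on version B (the rewrite author's own statement) =====
-- stated objective: faster
-- what changed: A's per-character cascade of per-layout bonus/malus branches is folded into one static (row, char) -> (dAZERTY, dQWERTY, dQWERTZ) delta table (every rule is additive, so the table is exact, including the tripled negative rules and stacked special bonuses); B does one table lookup and three additions per character and computes best layout, top score and second-best (median of three) by closed-form comparisons instead of dict max plus sort.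
import Mathlib
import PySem

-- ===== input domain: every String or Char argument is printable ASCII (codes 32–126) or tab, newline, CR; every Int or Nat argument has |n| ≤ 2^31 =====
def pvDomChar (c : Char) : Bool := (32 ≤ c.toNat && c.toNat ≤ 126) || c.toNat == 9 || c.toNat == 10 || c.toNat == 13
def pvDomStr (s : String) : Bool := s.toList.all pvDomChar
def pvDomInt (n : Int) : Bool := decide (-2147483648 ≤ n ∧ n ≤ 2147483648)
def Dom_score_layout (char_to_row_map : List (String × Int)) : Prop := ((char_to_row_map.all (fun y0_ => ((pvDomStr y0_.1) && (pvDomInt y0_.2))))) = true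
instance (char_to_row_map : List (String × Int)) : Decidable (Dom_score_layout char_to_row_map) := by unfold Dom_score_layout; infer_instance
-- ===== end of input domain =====

-- B replaces A's per-layout branch cascade by a static folded (row, char) → per-layout
-- delta table, one accumulation pass and closed-form max/median logic (objective: simpler).

-- ===== PORT A =====
-- LAYOUT_RULES: (name, (TOP, MID, BOT)); Python sets used only for membership, ported as lists
def pvLayoutRules : List (String × (List String × List String × List String)) :=
  [("AZERTY", (["A","Z","E","R","T"], ["Q","S","D","F","G","M"], ["W","X","C","V"])),
   ("QWERTY", (["Q","W","E","R","T","Y"], ["A","S","D","F","G"], ["Z","X","C","V"])),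
   ("QWERTZ", (["Q","W","E","R","T","Z"], ["A","S","D","F","G"], ["Y","X","C","V"]))]

-- scores[k] += v  (k is always a present key)
def pvBump (d : PySem.Dict String Int) (k : String) (v : Int) : PySem.Dict String Int :=
  d.insert k (d.getD k 0 + v)

-- the body of A's inner `for layout_name, rules in LAYOUT_RULES.items()` loop
def pvStepLayout (ch : String) (row : Int) (sc : PySem.Dict String Int)
    (p : String × (List String × List String × List String)) : PySem.Dict String Int :=
  let name := p.1
  let rules := p.2
  let sc :=
    if row == 0 && rules.1.contains ch then
      let sc := pvBump sc name 10
      if ["A","Q","Z","W"].contains ch then pvBump sc name 15 else sc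
    else if row == 1 && rules.2.1.contains ch then
      let sc := pvBump sc name 10
      if ["A","Q","M"].contains ch then pvBump sc name 15 else sc
    else if row == 2 && rules.2.2.contains ch then
      let sc := pvBump sc name 10
      if ["W","Z","Y","M"].contains ch then pvBump sc name 15 else sc
    else sc
  let sc := if row == 0 && ch == "Q" then pvBump sc "AZERTY" (-50) else sc
  let sc := if row == 0 && ch == "A" then pvBump (pvBump sc "QWERTY" (-50)) "QWERTZ" (-50) else sc
  let sc := if row == 0 && ch == "Z" then pvBump sc "QWERTY" (-50) else sc
  let sc := if row == 2 && ch == "Y" then pvBump (pvBump sc "QWERTZ" 40) "QWERTY" (-20) else sc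
  sc

def score_layout (char_to_row_map : List (String × Int)) : String × Int × (List (String × Int)) :=
  let scores0 : PySem.Dict String Int := PySem.Dict.ofList (pvLayoutRules.map (fun p => (p.1, (0:Int))))
  let st := char_to_row_map.foldl
      (fun (st : Int × PySem.Dict String Int) kv =>
        (st.1 + 1, pvLayoutRules.foldl (pvStepLayout kv.1 kv.2) st.2))
      ((0:Int), scores0)
  let scores := st.2
  if st.1 == 0 then ("INCONNU", 0, scores.items)
  else
    let best := (PySem.List.max? scores.keys (fun k => scores.getD k 0)).getD ""
    let maxScore := scores.getD best 0
    let sortedScores := PySem.List.sorted scores.values (fun x => x) true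
    let confidence : Int :=
      if 1 < sortedScores.length then
        min 100 (max 0 (50 + (sortedScores.headD 0 - sortedScores.tail.headD 0)))
      else 0
    if maxScore ≤ 0 then ("INCERTAIN", 0, scores.items)
    else (best, confidence, scores.items)

-- ===== PORT B =====
-- _DELTA[row][char] = (ΔAZERTY, ΔQWERTY, ΔQWERTZ)
def pvDelta : PySem.Dict Int (PySem.Dict String (Int × Int × Int)) := PySem.Dict.mk
  [(0, PySem.Dict.mk [("A",(25,-150,-150)),("E",(10,10,10)),("Q",(-150,25,25)),("R",(10,10,10)),
                      ("T",(10,10,10)),("W",(0,25,25)),("Y",(0,10,0)),("Z",(25,-150,25))]),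
   (1, PySem.Dict.mk [("A",(0,25,25)),("D",(10,10,10)),("F",(10,10,10)),("G",(10,10,10)),
                      ("M",(25,0,0)),("Q",(25,0,0)),("S",(10,10,10))]),
   (2, PySem.Dict.mk [("C",(10,10,10)),("V",(10,10,10)),("W",(25,0,0)),("X",(10,10,10)),
                      ("Y",(0,-60,145)),("Z",(0,25,0))])]

-- the body of B's accumulation loop: add the looked-up deltas (if any) to (az, qw, qz)
def pvAddDelta (acc : Int × Int × Int) (kv : String × Int) : Int × Int × Int :=
  match (pvDelta.getD kv.2 PySem.Dict.empty).get? kv.1 with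
  | some e => (acc.1 + e.1, acc.2.1 + e.2.1, acc.2.2 + e.2.2)
  | none => acc

def score_layout_alt (char_to_row_map : List (String × Int)) : String × Int × (List (String × Int)) :=
  if char_to_row_map.isEmpty then ("INCONNU", 0, [("AZERTY",0),("QWERTY",0),("QWERTZ",0)])
  else
    let t := char_to_row_map.foldl pvAddDelta ((0:Int),(0:Int),(0:Int))
    let az := t.1
    let qw := t.2.1
    let qz := t.2.2
    let scores := [("AZERTY", az), ("QWERTY", qw), ("QWERTZ", qz)]
    let p := if az ≥ qw ∧ az ≥ qz then ("AZERTY", az)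
             else if qw ≥ qz then ("QWERTY", qw) else ("QWERTZ", qz)
    if p.2 ≤ 0 then ("INCERTAIN", 0, scores)
    else
      let second := max (max (min az qw) (min az qz)) (min qw qz)
      (p.1, min 100 (max 0 (50 + p.2 - second)), scores)

-- ===== PRECONDITION & SPEC =====
def Spec_score_layout (char_to_row_map : List (String × Int)) (out : String × Int × (List (String × Int))) : Prop := out = score_layout_alt char_to_row_map
instance (char_to_row_map : List (String × Int)) (out : String × Int × (List (String × Int))) : Decidable (Spec_score_layout char_to_row_map out) := by unfold Spec_score_layout; infer_instance

-- ===== CLAIM (what is proved, stated in full; the proofs are below) =====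
def Claim_equal_score_layout : Prop := ∀ (char_to_row_map : List (String × Int)), Dom_score_layout char_to_row_map → Spec_score_layout char_to_row_map (score_layout char_to_row_map)

-- ===== LEMMAS AND PROOFS =====

def dict3 (a b c : Int) : PySem.Dict String Int :=
  PySem.Dict.mk [("AZERTY", a), ("QWERTY", b), ("QWERTZ", c)]
def pvLook (r : Int) (ch : String) : Int × Int × Int :=
  ((pvDelta.getD r PySem.Dict.empty).get? ch).getD (0,0,0)

set_option maxHeartbeats 1000000 in
lemma stepA_eq (ch : String) (r : Int) (a b c : Int) :
    pvLayoutRules.foldl (pvStepLayout ch r) (dict3 a b c)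
      = dict3 (a + (pvLook r ch).1) (b + (pvLook r ch).2.1) (c + (pvLook r ch).2.2) := by
  by_cases h0 : r = 0
  · subst h0
    by_cases hch : ch ∈ (["A","E","Q","R","T","W","Y","Z"] : List String)
    · fin_cases hch <;>
        (simp [pvLayoutRules, pvStepLayout, pvBump, dict3, pvLook, pvDelta,
          PySem.Dict.getD, PySem.Dict.get?, PySem.Dict.insert, PySem.Dict.empty] <;> omega)
    · simp only [List.mem_cons, List.mem_singleton, not_or] at hch
      obtain ⟨nA, nE, nQ, nR, nT, nW, nY, nZ, -⟩ := hch
      simp [pvLayoutRules, pvStepLayout, pvBump, dict3, pvLook, pvDelta,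
        PySem.Dict.getD, PySem.Dict.get?, PySem.Dict.insert, PySem.Dict.empty,
        nA, Ne.symm nA, nE, Ne.symm nE, nQ, Ne.symm nQ, nR, Ne.symm nR,
        nT, Ne.symm nT, nW, Ne.symm nW, nY, Ne.symm nY, nZ, Ne.symm nZ]
  · by_cases h1 : r = 1
    · subst h1
      by_cases hch : ch ∈ (["A","D","F","G","M","Q","S"] : List String)
      · fin_cases hch <;>
          (simp [pvLayoutRules, pvStepLayout, pvBump, dict3, pvLook, pvDelta,
            PySem.Dict.getD, PySem.Dict.get?, PySem.Dict.insert, PySem.Dict.empty] <;> omega)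
      · simp only [List.mem_cons, List.mem_singleton, not_or] at hch
        obtain ⟨nA, nD, nF, nG, nM, nQ, nS, -⟩ := hch
        simp [pvLayoutRules, pvStepLayout, pvBump, dict3, pvLook, pvDelta,
          PySem.Dict.getD, PySem.Dict.get?, PySem.Dict.insert, PySem.Dict.empty,
          nA, Ne.symm nA, nD, Ne.symm nD, nF, Ne.symm nF, nG, Ne.symm nG,
          nM, Ne.symm nM, nQ, Ne.symm nQ, nS, Ne.symm nS]
    · by_cases h2 : r = 2
      · subst h2
        by_cases hch : ch ∈ (["C","V","W","X","Y","Z"] : List String)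
        · fin_cases hch <;>
            (simp [pvLayoutRules, pvStepLayout, pvBump, dict3, pvLook, pvDelta,
              PySem.Dict.getD, PySem.Dict.get?, PySem.Dict.insert, PySem.Dict.empty] <;> omega)
        · simp only [List.mem_cons, List.mem_singleton, not_or] at hch
          obtain ⟨nC, nV, nW, nX, nY, nZ, -⟩ := hch
          simp [pvLayoutRules, pvStepLayout, pvBump, dict3, pvLook, pvDelta,
            PySem.Dict.getD, PySem.Dict.get?, PySem.Dict.insert, PySem.Dict.empty,
            nC, Ne.symm nC, nV, Ne.symm nV, nW, Ne.symm nW, nX, Ne.symm nX,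
            nY, Ne.symm nY, nZ, Ne.symm nZ]
      · simp [pvLayoutRules, pvStepLayout, pvBump, dict3, pvLook, pvDelta,
          PySem.Dict.getD, PySem.Dict.get?, PySem.Dict.insert, PySem.Dict.empty,
          h0, h1, h2,
          (show (0:Int) ≠ r from fun h => h0 h.symm),
          (show (1:Int) ≠ r from fun h => h1 h.symm),
          (show (2:Int) ≠ r from fun h => h2 h.symm)]

lemma pvAddDelta_eq (a b c : Int) (kv : String × Int) :
    pvAddDelta (a, b, c) kv =
      (a + (pvLook kv.2 kv.1).1, b + (pvLook kv.2 kv.1).2.1, c + (pvLook kv.2 kv.1).2.2) := by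
  unfold pvAddDelta pvLook
  cases h : (pvDelta.getD kv.2 PySem.Dict.empty).get? kv.1 <;> simp [h]

lemma loop_eq (m : List (String × Int)) (n a b c : Int) :
    m.foldl (fun (st : Int × PySem.Dict String Int) kv =>
        (st.1 + 1, pvLayoutRules.foldl (pvStepLayout kv.1 kv.2) st.2)) (n, dict3 a b c)
      = (n + m.length,
         dict3 (m.foldl pvAddDelta (a,b,c)).1 (m.foldl pvAddDelta (a,b,c)).2.1
               (m.foldl pvAddDelta (a,b,c)).2.2) := by
  induction m generalizing n a b c with
  | nil => simp
  | cons kv t ih =>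
    simp only [List.foldl_cons, stepA_eq, pvAddDelta_eq, ih]
    simp
    omega

lemma best3 (a b c : Int) :
    (PySem.List.max? (dict3 a b c).keys (fun k => (dict3 a b c).getD k 0)).getD ""
      = (if a ≥ b ∧ a ≥ c then "AZERTY" else if b ≥ c then "QWERTY" else "QWERTZ") := by
  simp only [PySem.List.max?, dict3, PySem.Dict.keys_mk, PySem.Dict.getD, PySem.Dict.get?]
  by_cases h1 : a < b <;> by_cases h2 : b < c <;> by_cases h3 : a < c <;>
    simp [h1, h2, h3] <;> split_ifs <;> first | rfl | (exfalso; omega)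

lemma sorted3 (a b c : Int) :
    PySem.List.sorted [a,b,c] (fun x => x) true
      = if a < b then (if b < c then [c,b,a] else if a < c then [b,c,a] else [b,a,c])
        else (if a < c then [c,a,b] else if b < c then [a,c,b] else [a,b,c]) := by
  by_cases h1 : a < b <;> by_cases h2 : b < c <;> by_cases h3 : a < c <;>
    simp [PySem.List.sorted, PySem.List.insertBy, h1, h2, h3] <;>
    first | rfl | (exfalso; omega)

lemma top3 (a b c : Int) :
    (if a ≥ b ∧ a ≥ c then a else if b ≥ c then b else c)
      = (PySem.List.sorted [a,b,c] (fun x => x) true).headD 0 := by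
  rw [sorted3]
  split_ifs <;> simp_all <;> omega

lemma second3 (a b c : Int) :
    max (max (min a b) (min a c)) (min b c)
      = (PySem.List.sorted [a,b,c] (fun x => x) true).tail.headD 0 := by
  rw [sorted3]
  split_ifs <;> simp [min_def, max_def] <;> split_ifs <;> omega

set_option maxHeartbeats 800000 in
lemma tail3 (a b c : Int) :
    (let scores := dict3 a b c
     let best := (PySem.List.max? scores.keys (fun k => scores.getD k 0)).getD ""
     let maxScore := scores.getD best 0
     let sortedScores := PySem.List.sorted scores.values (fun x => x) true
     let confidence : Int :=
       if 1 < sortedScores.length then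
         min 100 (max 0 (50 + (sortedScores.headD 0 - sortedScores.tail.headD 0)))
       else 0
     if maxScore ≤ 0 then (("INCERTAIN":String), (0:Int), scores.items)
     else (best, confidence, scores.items))
    = (let scores := [("AZERTY", a), ("QWERTY", b), ("QWERTZ", c)]
       let p := if a ≥ b ∧ a ≥ c then (("AZERTY":String), a)
                else if b ≥ c then ("QWERTY", b) else ("QWERTZ", c)
       if p.2 ≤ 0 then (("INCERTAIN":String), (0:Int), scores)
       else
         let second := max (max (min a b) (min a c)) (min b c)
         (p.1, min 100 (max 0 (50 + p.2 - second)), scores)) := by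
  have hi : (dict3 a b c).items = [("AZERTY", a), ("QWERTY", b), ("QWERTZ", c)] := rfl
  have hv : (dict3 a b c).values = [a, b, c] := rfl
  have hp1 : (if a ≥ b ∧ a ≥ c then (("AZERTY":String), a)
              else if b ≥ c then ("QWERTY", b) else ("QWERTZ", c)).1
      = (if a ≥ b ∧ a ≥ c then "AZERTY" else if b ≥ c then "QWERTY" else "QWERTZ") := by
    split_ifs <;> rfl
  have hp2 : (if a ≥ b ∧ a ≥ c then (("AZERTY":String), a)
              else if b ≥ c then ("QWERTY", b) else ("QWERTZ", c)).2
      = (if a ≥ b ∧ a ≥ c then a else if b ≥ c then b else c) := by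
    split_ifs <;> rfl
  have hms : (dict3 a b c).getD
        (if a ≥ b ∧ a ≥ c then "AZERTY" else if b ≥ c then "QWERTY" else "QWERTZ") 0
      = (if a ≥ b ∧ a ≥ c then a else if b ≥ c then b else c) := by
    split_ifs <;> rfl
  have hlen : 1 < (PySem.List.sorted [a,b,c] (fun x => x) true).length := by
    rw [sorted3]; split_ifs <;> simp
  simp only [best3, hv, hi, hp1, hp2, hms, if_pos hlen, ← top3, ← second3, add_sub_assoc]

-- ===== VERDICT (by name: the statement is the Claim_ definition above) =====
theorem score_layout_spec : Claim_equal_score_layout := by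
  intro m _
  unfold Spec_score_layout
  have h0 : PySem.Dict.ofList (pvLayoutRules.map (fun p => (p.1, (0:Int)))) = dict3 0 0 0 := by
    decide
  rcases m with _ | ⟨kv, t⟩
  · decide
  · simp only [score_layout, score_layout_alt, h0, loop_eq]
    have hc : ((0:Int) + ((kv :: t).length : Int) == 0) = false := by
      simp only [List.length_cons]; rw [beq_eq_false_iff_ne]; push_cast; omega
    simp only [hc, List.isEmpty_cons, Bool.false_eq_true, if_false]
    exact tail3 _ _ _
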